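-- pv_equiv track=rewrite | github.com/tjsander/advent2023 | day12/day12.py | not_already_broken
-- ===== SOURCE A (Python) =====
-- def not_already_broken(spring, count):
--     new_spr = spring.split("?")[0]
--     new_count = get_broken_count(new_spr)
--     if (len(new_count) > len(count)):
--         return False
--     for i in range (0, len(new_count)):
--         if (new_count[i] > count[i]):
--             return False
--     return True
--
-- def get_broken_count(spring):
--     broken = []
--     group = 0
--     for i in range(0, len(spring)):
--         sp = spring[i]
--         if (sp == "#"):
--             group += 1
--         else:
--             if (group > 0):
--                 broken.append(group)
--                 group = 0
--     if (group > 0):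
--         broken.append(group)
--         group = 0
--     return broken
-- ===== SOURCE B (Python) =====
-- def not_already_broken(spring, count):
--     # One fused pass over the prefix before the first '?': track the current
--     # '#'-run and an index into count; judge each run as it closes.
--     idx = 0
--     run = 0
--     for ch in spring:
--         if ch == "?":
--             break
--         if ch == "#":
--             run += 1
--         elif run > 0:
--             if idx >= len(count) or run > count[idx]:
--                 return False
--             idx += 1
--             run = 0
--     if run > 0 and (idx >= len(count) or run > count[idx]):
--         return False
--     return True
-- ===== Notes on version B (the rewrite author's own statement) =====
-- stated objective: simpler
-- what changed: Replaces build-groups-list-then-length-check-then-indexed-compare with a single fused pass over the prefix before '?' that judges each '#'-run against the next expected count as the run closes, so get_broken_count and the index loop disappear.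
import Mathlib
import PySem

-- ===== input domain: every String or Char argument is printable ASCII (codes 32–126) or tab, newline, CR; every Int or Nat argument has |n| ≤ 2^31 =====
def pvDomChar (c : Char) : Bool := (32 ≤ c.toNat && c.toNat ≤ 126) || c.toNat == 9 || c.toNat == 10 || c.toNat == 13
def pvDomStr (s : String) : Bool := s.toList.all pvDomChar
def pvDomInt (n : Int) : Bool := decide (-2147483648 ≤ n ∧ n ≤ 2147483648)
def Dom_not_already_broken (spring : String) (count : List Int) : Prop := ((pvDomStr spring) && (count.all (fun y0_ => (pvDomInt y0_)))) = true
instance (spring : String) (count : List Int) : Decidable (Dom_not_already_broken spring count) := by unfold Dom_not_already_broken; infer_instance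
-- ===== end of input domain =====

-- B fuses A's build-groups-list-then-compare into one pass over the prefix before '?',
-- judging each '#'-run against the next expected count as the run closes (objective: simpler).


-- ===== PORT A =====
-- one step of get_broken_count's loop body: state = (broken, group)
def gbcStep (st : List Int × Int) (sp : Char) : List Int × Int :=
  if sp = '#' then (st.1, st.2 + 1)
  else if st.2 > 0 then (st.1 ++ [st.2], 0) else st

-- the trailing 'if (group > 0): broken.append(group)' after the loop
def gbcFin (st : List Int × Int) : List Int :=
  if st.2 > 0 then st.1 ++ [st.2] else st.1

-- get_broken_count: 'for i in range(0, len(spring)): sp = spring[i]; …' iterates the chars in order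
def get_broken_count (spring : List Char) : List Int :=
  gbcFin (spring.foldl gbcStep ([], 0))

def not_already_broken (spring : String) (count : List Int) : Bool :=
  let new_spr := (PySem.Chars.splitOn spring.toList ['?']).getD 0 []  -- spring.split("?")[0]; split's result is never empty
  let new_count := get_broken_count new_spr
  if new_count.length > count.length then false
  else  -- early-return-False index loop = all
    (PySem.List.pyRange 0 new_count.length 1).all
      (fun i => !(PySem.List.pyGetD new_count i 0 > PySem.List.pyGetD count i 0))

-- ===== PORT B =====
-- 'idx >= len(count) or run > count[idx]' fails (no early False) exactly when this holds
def nabClose (count : List Int) (idx : Nat) (run : Int) : Bool :=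
  decide (idx < count.length) && decide (run ≤ count.getD idx 0)

def nabGo (cs : List Char) (count : List Int) (idx : Nat) (run : Int) : Bool :=
  match cs with
  | [] => if run > 0 then nabClose count idx run else true
  | c :: rest =>
      if c = '?' then (if run > 0 then nabClose count idx run else true)
      else if c = '#' then nabGo rest count idx (run + 1)
      else if run > 0 then
        (if nabClose count idx run then nabGo rest count (idx + 1) 0 else false)
      else nabGo rest count idx run

def not_already_broken_alt (spring : String) (count : List Int) : Bool :=
  nabGo spring.toList count 0 0

-- ===== PRECONDITION & SPEC =====
def Spec_not_already_broken (spring : String) (count : List Int) (out : Bool) : Prop := out = not_already_broken_alt spring count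
instance (spring : String) (count : List Int) (out : Bool) : Decidable (Spec_not_already_broken spring count out) := by unfold Spec_not_already_broken; infer_instance

-- ===== CLAIM (what is proved, stated in full; the proofs are below) =====
def Claim_equal_not_already_broken : Prop := ∀ (spring : String) (count : List Int), Dom_not_already_broken spring count → Spec_not_already_broken spring count (not_already_broken spring count)

-- ===== LEMMAS AND PROOFS =====

-- the head of split("?") is the prefix before the first '?'
theorem splitOn_go_head (fuel : Nat) : ∀ (l cur : List Char) (acc : List (List Char)),
    l.length < fuel →
    ∃ rest, PySem.Chars.splitOn.go ['?'] fuel l cur acc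
      = acc.reverse ++ (cur.reverse ++ l.takeWhile (· ≠ '?')) :: rest := by
  induction fuel with
  | zero => intro l cur acc h; omega
  | succ f ih =>
    intro l cur acc h
    match l with
    | [] =>
      refine ⟨[], ?_⟩
      simp [PySem.Chars.splitOn.go]
    | c :: rest =>
      by_cases hc : c = '?'
      · subst hc
        have hpre : List.isPrefixOf ['?'] ('?' :: rest) = true := by simp [List.isPrefixOf]
        rw [PySem.Chars.splitOn.go]
        simp only [hpre, if_pos, List.length_cons, List.length_nil, List.drop_succ_cons, List.drop_zero]
        obtain ⟨r, hr⟩ := ih rest [] (cur.reverse :: acc) (by simp at h ⊢; omega)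
        refine ⟨rest.takeWhile (· ≠ '?') :: r, ?_⟩
        rw [hr]
        simp [List.takeWhile]
      · have hpre : List.isPrefixOf ['?'] (c :: rest) = false := by
          simp [List.isPrefixOf]; exact fun hh => hc hh.symm
        rw [PySem.Chars.splitOn.go]
        simp only [hpre]
        obtain ⟨r, hr⟩ := ih rest (c :: cur) acc (by simp at h ⊢; omega)
        refine ⟨r, ?_⟩
        rw [hr]
        simp [List.takeWhile, hc]

theorem splitOn_head (cs : List Char) :
    (PySem.Chars.splitOn cs ['?']).getD 0 [] = cs.takeWhile (· ≠ '?') := by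
  obtain ⟨r, hr⟩ := splitOn_go_head (cs.length + 1) cs [] [] (by omega)
  unfold PySem.Chars.splitOn
  rw [hr]; simp

-- pure recursive form of get_broken_count with a pending group
def groups (run : Int) (cs : List Char) : List Int :=
  match cs with
  | [] => if run > 0 then [run] else []
  | c :: rest =>
      if c = '#' then groups (run + 1) rest
      else if run > 0 then run :: groups 0 rest
      else groups 0 rest

theorem gbc_foldl (cs : List Char) : ∀ (acc : List Int) (run : Int), 0 ≤ run →
    gbcFin (cs.foldl gbcStep (acc, run)) = acc ++ groups run cs := by
  induction cs with
  | nil =>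
    intro acc run h
    simp only [List.foldl_nil, groups, gbcFin]
    split <;> simp
  | cons c rest ih =>
    intro acc run h
    simp only [List.foldl_cons, groups, gbcStep]
    split_ifs with hc hr
    · exact ih acc (run + 1) (by omega)
    · rw [ih (acc ++ [run]) 0 (by omega)]; simp
    · have h0 : run = 0 := by omega
      subst h0
      exact ih acc 0 le_rfl

-- element-wise comparison of the groups against count from position idx on
def okFrom (gs : List Int) (count : List Int) (idx : Nat) : Bool :=
  match gs with
  | [] => true
  | g :: gs' => nabClose count idx g && okFrom gs' count (idx + 1)

theorem okFrom_of_le (count : List Int) (nc : List Int) : ∀ (idx : Nat),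
    idx + nc.length ≤ count.length →
    okFrom nc count idx = (List.range nc.length).all
      (fun k => decide (nc.getD k 0 ≤ count.getD (idx + k) 0)) := by
  induction nc with
  | nil => intro idx h; simp [okFrom]
  | cons g gs ih =>
    intro idx h
    simp only [okFrom, nabClose, List.length_cons, List.range_succ_eq_map, List.all_cons,
      List.all_map]
    rw [ih (idx + 1) (by simp at h ⊢; omega)]
    have hlt : idx < count.length := by simp at h; omega
    simp only [hlt, decide_true, Bool.true_and]
    refine congrArg₂ (· && ·) (by simp) ?_
    refine List.all_congr rfl ?_
    intro k
    have hk : idx + 1 + k = idx + (k + 1) := by omega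
    simp [Function.comp, hk]

theorem okFrom_overflow (count : List Int) (nc : List Int) : ∀ (idx : Nat),
    count.length < idx + nc.length → nc ≠ [] → okFrom nc count idx = false := by
  induction nc with
  | nil => intro idx h hne; exact absurd rfl hne
  | cons g gs ih =>
    intro idx h _
    by_cases hidx : idx < count.length
    · have hgs : gs ≠ [] := by
        intro he; subst he; simp at h; omega
      simp only [okFrom]
      rw [ih (idx + 1) (by simp at h ⊢; omega) hgs]
      simp
    · simp only [okFrom, nabClose, hidx, decide_false, Bool.false_and]

theorem a_check_eq_okFrom (nc count : List Int) :
    (if nc.length > count.length then false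
     else (PySem.List.pyRange 0 nc.length 1).all
       (fun i => !(PySem.List.pyGetD nc i 0 > PySem.List.pyGetD count i 0)))
    = okFrom nc count 0 := by
  by_cases h : nc.length > count.length
  · rw [if_pos h, okFrom_overflow count nc 0 (by omega) (by intro he; subst he; simp at h)]
  · rw [if_neg h, okFrom_of_le count nc 0 (by omega)]
    rw [PySem.List.pyRange_zero_nat, List.all_map]
    refine List.all_congr rfl ?_
    intro k
    simp [PySem.List.pyGetD_natCast, ← decide_not]

theorem nabGo_eq (cs : List Char) : ∀ (count : List Int) (idx : Nat) (run : Int), 0 ≤ run →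
    nabGo cs count idx run = okFrom (groups run (cs.takeWhile (· ≠ '?'))) count idx := by
  induction cs with
  | nil =>
    intro count idx run h
    simp only [nabGo, List.takeWhile_nil, groups]
    split_ifs <;> simp [okFrom]
  | cons c rest ih =>
    intro count idx run h
    by_cases hq : c = '?'
    · subst hq
      simp only [nabGo, List.takeWhile_cons, decide_eq_true_eq, ne_eq,
        not_true_eq_false, if_false, groups]
      split_ifs <;> simp [okFrom]
    · have htw : (c :: rest).takeWhile (· ≠ '?') = c :: rest.takeWhile (· ≠ '?') := by
        simp [hq]
      rw [htw]
      by_cases hh : c = '#'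
      · simp only [nabGo, hh, groups, ite_true]
        exact ih count idx (run + 1) (by omega)
      · by_cases hr : run > 0
        · simp only [nabGo, groups, hq, hh, hr, if_true, ite_false]
          rw [okFrom]
          cases hcl : nabClose count idx run with
          | false => simp
          | true => simp [ih count (idx + 1) 0 le_rfl]
        · have h0 : run = 0 := by omega
          subst h0
          simp only [nabGo, groups, hq, hh, hr, ite_false]
          exact ih count idx 0 le_rfl

-- ===== VERDICT (by name: the statement is the Claim_ definition above) =====
theorem not_already_broken_spec : Claim_equal_not_already_broken := by
  intro spring count _
  unfold Spec_not_already_broken not_already_broken not_already_broken_alt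
  rw [splitOn_head]
  have hg : get_broken_count (spring.toList.takeWhile (· ≠ '?'))
      = groups 0 (spring.toList.takeWhile (· ≠ '?')) := by
    simpa using gbc_foldl (spring.toList.takeWhile (· ≠ '?')) [] 0 le_rfl
  simp only []
  rw [hg, a_check_eq_okFrom, nabGo_eq spring.toList count 0 0 le_rfl]
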